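-- pv_equiv track=rewrite | github.com/yg-moon/problem-solving | programmers/practice-kit/greedy/Lv2-조이스틱.py | solution
-- ===== SOURCE A (Python) =====
-- def solution(name):
--     N = len(name)
--     visited = [False] * N
--     name_list = list(name)
--     idx = 0
--     cnt = 0
--
--     # 모든 A는 visited
--     for i in range(N):
--         if name_list[i] == "A":
--             visited[i] = True
--
--     # 첫 글자 처리
--     cnt += ord(name_list[0]) - ord("A")
--     visited[0] = True
--
--     # 나머지 글자 처리
--     while not all(visited):
--         cur = idx
--         left = 0
--         while visited[cur]:
--             cur = (cur - 1) % N
--             left += 1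
--         cur = idx
--         right = 0
--         while visited[cur]:
--             cur = (cur + 1) % N
--             right += 1
--
--         if left < right:
--             idx = (idx - left) % N
--             diff = ord(name_list[idx]) - ord("A")
--             if diff > 13:
--                 diff = 26 - diff
--             cnt += diff
--             cnt += left
--             visited[idx] = True
--         else:
--             idx = (idx + right) % N
--             diff = ord(name_list[idx]) - ord("A")
--             if diff > 13:
--                 diff = 26 - diff
--             cnt += diff
--             cnt += right
--             visited[idx] = True
--
--     return cnt
-- ===== SOURCE B (Python) =====
-- def solution(name):
--     N = len(name)
--     todo = [i for i in range(1, N) if name[i] != "A"]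
--     cnt = ord(name[0]) - ord("A")
--     idx = 0
--     while todo:
--         left = min((idx - j) % N for j in todo)
--         right = min((j - idx) % N for j in todo)
--         if left < right:
--             idx = (idx - left) % N
--         else:
--             idx = (idx + right) % N
--         d = ord(name[idx]) - ord("A")
--         cnt += (d if d <= 13 else 26 - d) + min(left, right)
--         todo.remove(idx)
--     return cnt
-- ===== Notes on version B (the rewrite author's own statement) =====
-- stated objective: alternative
-- what changed: B drops A's visited[] boolean array and step-by-step circular walks: it keeps one list of still-needed indices, picks the nearest one by taking the minimum circular distance (modular arithmetic) in each direction, and deletes it on visit.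
import Mathlib
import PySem

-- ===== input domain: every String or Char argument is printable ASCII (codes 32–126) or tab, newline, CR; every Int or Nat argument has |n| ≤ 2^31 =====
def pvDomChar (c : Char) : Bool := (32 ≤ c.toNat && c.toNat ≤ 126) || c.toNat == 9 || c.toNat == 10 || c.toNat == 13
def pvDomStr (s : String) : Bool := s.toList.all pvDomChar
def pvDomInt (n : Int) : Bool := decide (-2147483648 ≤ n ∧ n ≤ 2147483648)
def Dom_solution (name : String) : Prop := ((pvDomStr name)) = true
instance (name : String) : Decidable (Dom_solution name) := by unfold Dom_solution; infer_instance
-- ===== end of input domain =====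

-- B replaces A's visited[] array and its step-by-step circular walks by a list of the
-- still-needed indices, picking the nearest one by minimum modular distance and deleting
-- it on visit; returns are equal on every non-empty name (objective: alternative).

-- ===== PORT A =====

def aGetB (v : List Bool) (i : Int) : Bool := PySem.List.pyGetD v i false
def aGetC (l : List Char) (i : Int) : Char := PySem.List.pyGetD l i 'A'
def aSet (v : List Bool) (i : Int) (b : Bool) : List Bool :=
  if 0 ≤ i then v.set i.toNat b else v
def aTurn (c : Char) : Int :=
  let d : Int := (c.toNat : Int) - ('A'.toNat : Int)
  if d > 13 then 26 - d else d
def aScan (v : List Bool) (N step cur : Int) (fuel : Nat) : Int :=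
  match fuel with
  | 0 => 0
  | f + 1 =>
      if aGetB v cur then aScan v N step (PySem.Int.mod (cur + step) N) f + 1
      else 0
def aLoop (nl : List Char) (v : List Bool) (N idx cnt : Int) (fuel : Nat) : Int :=
  match fuel with
  | 0 => cnt
  | f + 1 =>
      if v.all (fun b => b) then cnt
      else
        let left := aScan v N (-1) idx v.length
        let right := aScan v N 1 idx v.length
        if left < right then
          let idx' := PySem.Int.mod (idx - left) N
          aLoop nl (aSet v idx' true) N idx' (cnt + aTurn (aGetC nl idx') + left) f
        else
          let idx' := PySem.Int.mod (idx + right) N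
          aLoop nl (aSet v idx' true) N idx' (cnt + aTurn (aGetC nl idx') + right) f

def solution (name : String) : Int :=
  let nl := name.toList
  let N : Int := (nl.length : Int)
  let visited0 := nl.map (fun c => c == 'A')     -- for i in range(N): if name_list[i] == 'A': visited[i] = True
  let visited := aSet visited0 0 true            -- visited[0] = True
  let cnt0 : Int := ((aGetC nl 0).toNat : Int) - ('A'.toNat : Int)   -- cnt += ord(name_list[0]) - ord('A')
  aLoop nl visited N 0 cnt0 nl.length

-- ===== PORT B =====

def bGetC (l : List Char) (i : Int) : Char := PySem.List.pyGetD l i 'A'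
def bLoop (nl : List Char) (N : Int) (todo : List Int) (idx cnt : Int) (fuel : Nat) : Int :=
  match fuel with
  | 0 => cnt
  | f + 1 =>
      match todo with
      | [] => cnt
      | t :: ts =>
          let left := (ts.map (fun j => PySem.Int.mod (idx - j) N)).foldl min
                        (PySem.Int.mod (idx - t) N)
          let right := (ts.map (fun j => PySem.Int.mod (j - idx) N)).foldl min
                        (PySem.Int.mod (t - idx) N)
          let idx' := if left < right then PySem.Int.mod (idx - left) N
                      else PySem.Int.mod (idx + right) N
          let d : Int := ((bGetC nl idx').toNat : Int) - ('A'.toNat : Int)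
          bLoop nl N ((t :: ts).erase idx') idx'
            (cnt + ((if d ≤ 13 then d else 26 - d) + min left right)) f

def solution_alt (name : String) : Int :=
  let nl := name.toList
  let N : Int := (nl.length : Int)
  let todo := (PySem.List.pyRange 1 N).filter (fun i => !(bGetC nl i == 'A'))   -- [i for i in range(1, N) if name[i] != 'A']
  bLoop nl N todo 0 (((bGetC nl 0).toNat : Int) - ('A'.toNat : Int)) nl.length

-- ===== PRECONDITION & SPEC =====
-- Pre excludes only the empty string, on which A raises IndexError (name_list[0]).
def Pre_solution (name : String) : Prop := name ≠ ""
instance (name : String) : Decidable (Pre_solution name) := by unfold Pre_solution; infer_instance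
def pvWitness_solution : String := "JEROEN"

def Spec_solution (name : String) (out : Int) : Prop := out = solution_alt name
instance (name : String) (out : Int) : Decidable (Spec_solution name out) := by unfold Spec_solution; infer_instance

-- ===== CLAIM (what is proved, stated in full; the proofs are below) =====
def Claim_equal_solution : Prop := ∀ (name : String), Dom_solution name → Pre_solution name → Spec_solution name (solution name)

-- ===== LEMMAS AND PROOFS =====

def falseIdx : List Bool → Int → List Int
  | [], _ => []
  | b :: r, off => if b then falseIdx r (off + 1) else off :: falseIdx r (off + 1)

lemma mem_falseIdx (v : List Bool) (off j : Int) :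
    j ∈ falseIdx v off ↔ ∃ k : Nat, k < v.length ∧ j = off + k ∧ v.getD k true = false := by
  induction v generalizing off with
  | nil => simp [falseIdx]
  | cons b r ih =>
      cases b with
      | true =>
          simp only [falseIdx, if_true, ih]
          constructor
          · rintro ⟨k, hk, hj, hv⟩
            exact ⟨k + 1, by simpa using hk, by push_cast; omega, by simpa using hv⟩
          · rintro ⟨k, hk, hj, hv⟩
            match k with
            | 0 => simp at hv
            | k + 1 => exact ⟨k, by simpa using hk, by push_cast at hj ⊢; omega, by simpa using hv⟩
      | false =>
          simp only [falseIdx, Bool.false_eq_true, if_false, List.mem_cons, ih]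
          constructor
          · rintro (rfl | ⟨k, hk, hj, hv⟩)
            · exact ⟨0, by simp, by simp, by simp⟩
            · exact ⟨k + 1, by simpa using hk, by push_cast; omega, by simpa using hv⟩
          · rintro ⟨k, hk, hj, hv⟩
            match k with
            | 0 => left; simpa using hj
            | k + 1 =>
                right
                exact ⟨k, by simpa using hk, by push_cast at hj ⊢; omega, by simpa using hv⟩

lemma falseIdx_set (v : List Bool) (off : Int) (k : Nat) (hk : k < v.length)
    (hv : v.getD k true = false) :
    falseIdx (v.set k true) off = (falseIdx v off).erase (off + k) := by
  induction v generalizing off k with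
  | nil => simp at hk
  | cons b r ih =>
      match k with
      | 0 =>
          have hb : b = false := by simpa using hv
          subst hb
          simp [falseIdx]
      | k + 1 =>
          have hrec := ih (off + 1) k (by simpa using hk) (by simpa using hv)
          cases b with
          | true =>
              simp only [List.set, falseIdx, if_true]
              rw [show off + ((k+1 : Nat) : Int) = (off + 1) + (k : Int) by push_cast; omega]
              exact hrec
          | false =>
              simp only [List.set, falseIdx, Bool.false_eq_true, if_false]
              rw [List.erase_cons_tail]
              · rw [show off + ((k+1 : Nat) : Int) = (off + 1) + (k : Int) by push_cast; omega]
                rw [hrec]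
              · simp only [beq_iff_eq]; push_cast; omega

lemma falseIdx_bounds (v : List Bool) (j : Int) (h : j ∈ falseIdx v 0) :
    0 ≤ j ∧ j < v.length ∧ v.getD j.toNat true = false := by
  rcases (mem_falseIdx v 0 j).1 h with ⟨k, hk, rfl, hv⟩
  refine ⟨by positivity, by omega, by simpa using hv⟩
lemma emod_small_cases (n a : Int) (_hn : 0 < n) (h1 : -n < a) (h2 : a < n) :
    a % n = if 0 ≤ a then a else a + n := by
  split_ifs with h
  · exact Int.emod_eq_of_lt h h2
  · conv_lhs => rw [← Int.add_mul_emod_self_left a n 1]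
    rw [mul_one]
    exact Int.emod_eq_of_lt (by omega) (by omega)

lemma dist_step (n s cur j : Int) (hn : 0 < n) (hs : s = 1 ∨ s = -1)
    (hc0 : 0 ≤ cur) (hc1 : cur < n) (hj0 : 0 ≤ j) (hj1 : j < n) (hne : j ≠ cur) :
    PySem.Int.mod (s * (j - cur)) n
      = PySem.Int.mod (s * (j - PySem.Int.mod (cur + s) n)) n + 1 := by
  rw [PySem.Int.mod_eq_emod_of_pos hn, PySem.Int.mod_eq_emod_of_pos hn,
      PySem.Int.mod_eq_emod_of_pos hn]
  rcases hs with rfl | rfl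
  · have hc' : (cur + 1) % n = if cur + 1 < n then cur + 1 else 0 := by
      split_ifs with h
      · exact Int.emod_eq_of_lt (by omega) h
      · rw [show cur + 1 = n by omega]; exact Int.emod_self
    rw [hc']
    split_ifs with h
    · rw [emod_small_cases n (1 * (j - cur)) hn (by omega) (by omega),
          emod_small_cases n (1 * (j - (cur + 1))) hn (by omega) (by omega)]
      split_ifs <;> omega
    · rw [emod_small_cases n (1 * (j - cur)) hn (by omega) (by omega),
          emod_small_cases n (1 * (j - 0)) hn (by omega) (by omega)]
      split_ifs <;> omega
  · have hc' : (cur + -1) % n = if 0 ≤ cur - 1 then cur - 1 else n - 1 := by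
      split_ifs with h
      · rw [show cur + -1 = cur - 1 by ring]; exact Int.emod_eq_of_lt h (by omega)
      · rw [show cur + -1 = n - 1 + n * (-1) by omega]
        rw [Int.add_mul_emod_self_left]
        exact Int.emod_eq_of_lt (by omega) (by omega)
    rw [hc']
    split_ifs with h
    · rw [emod_small_cases n (-1 * (j - cur)) hn (by omega) (by omega),
          emod_small_cases n (-1 * (j - (cur - 1))) hn (by omega) (by omega)]
      split_ifs <;> omega
    · rw [emod_small_cases n (-1 * (j - cur)) hn (by omega) (by omega),
          emod_small_cases n (-1 * (j - (n - 1))) hn (by omega) (by omega)]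
      split_ifs <;> omega
lemma foldl_min_add_one (l : List Int) (a : Int) :
    (l.map (fun x => x + 1)).foldl min (a + 1) = l.foldl min a + 1 := by
  induction l generalizing a with
  | nil => simp
  | cons x xs ih =>
      simp only [List.map, List.foldl]
      rw [show min (a + 1) (x + 1) = min a x + 1 by omega]
      exact ih _

lemma aGetB_eq (v : List Bool) (k : Nat) (hk : k < v.length) :
    aGetB v (k : Int) = v.getD k true := by
  unfold aGetB
  rw [PySem.List.pyGetD_eq_getElem v false (by positivity) (by exact_mod_cast hk)]
  simp [List.getD_eq_getElem?_getD, hk]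

lemma falseIdx_of_false (v : List Bool) (k : Nat) (hk : k < v.length)
    (hv : v.getD k true = false) : (k : Int) ∈ falseIdx v 0 :=
  (mem_falseIdx v 0 k).2 ⟨k, hk, by simp, hv⟩

lemma mod_zero_left (n : Int) (hn : 0 < n) : PySem.Int.mod 0 n = 0 := by
  rw [PySem.Int.mod_eq_emod_of_pos hn]; simp

lemma scan_eq (v : List Bool) (n : Nat) (hn : v.length = n) (s : Int)
    (hs : s = 1 ∨ s = -1) (t : Int) (ts : List Int) (hF : falseIdx v 0 = t :: ts) :
    ∀ (fuel : Nat) (cur : Int), 0 ≤ cur → cur < (n : Int) →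
      ((ts.map (fun j => PySem.Int.mod (s * (j - cur)) (n : Int))).foldl min
        (PySem.Int.mod (s * (t - cur)) (n : Int)) < (fuel : Int)) →
      aScan v (n : Int) s cur fuel =
        (ts.map (fun j => PySem.Int.mod (s * (j - cur)) (n : Int))).foldl min
          (PySem.Int.mod (s * (t - cur)) (n : Int)) := by
  have ht0 := falseIdx_bounds v t (by rw [hF]; exact List.mem_cons_self)
  have hnpos : (0 : Int) < (n : Int) := by omega
  intro fuel
  induction fuel with
  | zero =>
      intro cur h0 h1 hM
      exfalso
      have hge : 0 ≤ (ts.map (fun j => PySem.Int.mod (s * (j - cur)) (n : Int))).foldl min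
          (PySem.Int.mod (s * (t - cur)) (n : Int)) := by
        rcases PySem.List.foldl_min_mem (ts.map (fun j => PySem.Int.mod (s * (j - cur)) (n : Int)))
            (PySem.Int.mod (s * (t - cur)) (n : Int)) with h | h
        · rw [h]; exact PySem.Int.mod_nonneg _ hnpos
        · rcases List.mem_map.1 h with ⟨j, hj, hEq⟩
          rw [← hEq]; exact PySem.Int.mod_nonneg _ hnpos
      simp at hM; omega
  | succ f ih =>
      intro cur h0 h1 hM
      have hcg : aGetB v cur = v.getD cur.toNat true := by
        have := aGetB_eq v cur.toNat (by omega)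
        rwa [show ((cur.toNat : Nat) : Int) = cur by omega] at this
      by_cases hvc : v.getD cur.toNat true = false
      · -- current position unvisited: scan stops, min distance is 0
        have hstop : aScan v (n : Int) s cur (f + 1) = 0 := by
          simp only [aScan, hcg, hvc]; rfl
        have hcmem : cur ∈ t :: ts := by
          rw [← hF]
          have := falseIdx_of_false v cur.toNat (by omega) hvc
          rwa [show ((cur.toNat : Nat) : Int) = cur by omega] at this
        have hd0 : PySem.Int.mod (s * (cur - cur)) (n : Int) = 0 := by
          rw [show s * (cur - cur) = 0 by ring]; exact mod_zero_left _ hnpos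
        have hle : (ts.map (fun j => PySem.Int.mod (s * (j - cur)) (n : Int))).foldl min
            (PySem.Int.mod (s * (t - cur)) (n : Int)) ≤ 0 := by
          rcases List.mem_cons.1 hcmem with rfl | hmem
          · calc _ ≤ PySem.Int.mod (s * (cur - cur)) (n : Int) :=
                  (PySem.List.foldl_min_le _ _).1
              _ = 0 := hd0
          · calc _ ≤ PySem.Int.mod (s * (cur - cur)) (n : Int) :=
                  (PySem.List.foldl_min_le _ _).2 _ (List.mem_map.2 ⟨cur, hmem, rfl⟩)
              _ = 0 := hd0
        have hge : 0 ≤ (ts.map (fun j => PySem.Int.mod (s * (j - cur)) (n : Int))).foldl min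
            (PySem.Int.mod (s * (t - cur)) (n : Int)) := by
          rcases PySem.List.foldl_min_mem (ts.map (fun j => PySem.Int.mod (s * (j - cur)) (n : Int)))
              (PySem.Int.mod (s * (t - cur)) (n : Int)) with h | h
          · rw [h]; exact PySem.Int.mod_nonneg _ hnpos
          · rcases List.mem_map.1 h with ⟨j, hj, hEq⟩
            rw [← hEq]; exact PySem.Int.mod_nonneg _ hnpos
        omega
      · have hvc' : v.getD cur.toNat true = true := by
          cases h : v.getD cur.toNat true
          · exact absurd h hvc
          · rfl
        have hpt : ∀ j ∈ t :: ts, PySem.Int.mod (s * (j - cur)) (n : Int)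
            = PySem.Int.mod (s * (j - PySem.Int.mod (cur + s) (n : Int))) (n : Int) + 1 := by
          intro j hj
          have hb := falseIdx_bounds v j (by rw [hF]; exact hj)
          have hne : j ≠ cur := by
            intro h
            rw [h] at hb
            exact absurd hb.2.2 (by rw [hvc']; simp)
          exact dist_step (n : Int) s cur j hnpos hs h0 h1 hb.1 (by omega) hne
        set cur' := PySem.Int.mod (cur + s) (n : Int) with hcur'
        have hmap : ts.map (fun j => PySem.Int.mod (s * (j - cur)) (n : Int))
            = (ts.map (fun j => PySem.Int.mod (s * (j - cur')) (n : Int))).map (fun x => x + 1) := by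
          rw [List.map_map]
          exact List.map_congr_left (fun j hj => hpt j (List.mem_cons_of_mem _ hj))
        have hacc : PySem.Int.mod (s * (t - cur)) (n : Int)
            = PySem.Int.mod (s * (t - cur')) (n : Int) + 1 := hpt t List.mem_cons_self
        have hstep : aScan v (n : Int) s cur (f + 1)
            = aScan v (n : Int) s cur' f + 1 := by
          simp only [aScan, hcg, hvc']
          rfl
        rw [hstep, hmap, hacc, foldl_min_add_one]
        rw [hmap, hacc, foldl_min_add_one] at hM
        have h0' : 0 ≤ cur' := PySem.Int.mod_nonneg _ hnpos
        have h1' : cur' < (n : Int) := PySem.Int.mod_lt _ hnpos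
        rw [ih cur' h0' h1' (by push_cast at hM ⊢; omega)]

lemma falseIdx_nil_iff (v : List Bool) (off : Int) :
    falseIdx v off = [] ↔ v.all (fun b => b) = true := by
  induction v generalizing off with
  | nil => simp [falseIdx]
  | cons b r ih =>
      cases b with
      | true => simpa [falseIdx] using ih (off + 1)
      | false => simp [falseIdx]

lemma mod_roundL (n idx j : Int) (hn : 0 < n) (hi0 : 0 ≤ idx) (hi1 : idx < n)
    (hj0 : 0 ≤ j) (hj1 : j < n) :
    PySem.Int.mod (idx - PySem.Int.mod (idx - j) n) n = j := by
  rw [PySem.Int.mod_eq_emod_of_pos hn, PySem.Int.mod_eq_emod_of_pos hn]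
  rw [emod_small_cases n (idx - j) hn (by omega) (by omega)]
  split_ifs with h
  · rw [show idx - (idx - j) = j by ring]; exact Int.emod_eq_of_lt hj0 hj1
  · rw [show idx - (idx - j + n) = j - n by ring]
    rw [emod_small_cases n (j - n) hn (by omega) (by omega)]
    split_ifs <;> omega

lemma mod_roundR (n idx j : Int) (hn : 0 < n) (hi0 : 0 ≤ idx) (hi1 : idx < n)
    (hj0 : 0 ≤ j) (hj1 : j < n) :
    PySem.Int.mod (idx + PySem.Int.mod (j - idx) n) n = j := by
  rw [PySem.Int.mod_eq_emod_of_pos hn, PySem.Int.mod_eq_emod_of_pos hn]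
  rw [emod_small_cases n (j - idx) hn (by omega) (by omega)]
  split_ifs with h
  · rw [show idx + (j - idx) = j by ring]; exact Int.emod_eq_of_lt hj0 hj1
  · rw [show idx + (j - idx + n) = j + n * 1 by ring, Int.add_mul_emod_self_left]
    exact Int.emod_eq_of_lt hj0 hj1

lemma loop_eq (nl : List Char) (n : Nat) :
    ∀ (fuel : Nat) (v : List Bool) (idx cnt : Int), v.length = n →
      0 ≤ idx → idx < (n : Int) →
      aLoop nl v (n : Int) idx cnt fuel = bLoop nl (n : Int) (falseIdx v 0) idx cnt fuel := by
  intro fuel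
  induction fuel with
  | zero => intro v idx cnt hv h0 h1; rfl
  | succ f ih =>
      intro v idx cnt hv h0 h1
      have hnpos : (0 : Int) < (n : Int) := by omega
      cases hF : falseIdx v 0 with
      | nil =>
          have hall : v.all (fun b => b) = true := (falseIdx_nil_iff v 0).1 hF
          simp [aLoop, bLoop, hall]
      | cons t ts =>
          have hall : v.all (fun b => b) = false := by
            cases h : v.all (fun b => b)
            · rfl
            · rw [← falseIdx_nil_iff v 0] at h; rw [h] at hF; exact absurd hF (by simp)
          -- scans equal the B-style minima
          have hLfun : (fun j => PySem.Int.mod (-1 * (j - idx)) (n : Int))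
              = (fun j => PySem.Int.mod (idx - j) (n : Int)) := by
            funext j; congr 1; ring
          have hRfun : (fun j => PySem.Int.mod (1 * (j - idx)) (n : Int))
              = (fun j => PySem.Int.mod (j - idx) (n : Int)) := by
            funext j; congr 1; ring
          have hLbound : (ts.map (fun j => PySem.Int.mod (idx - j) (n : Int))).foldl min
              (PySem.Int.mod (idx - t) (n : Int)) < (n : Int) :=
            lt_of_le_of_lt (PySem.List.foldl_min_le _ _).1 (PySem.Int.mod_lt _ hnpos)
          have hRbound : (ts.map (fun j => PySem.Int.mod (j - idx) (n : Int))).foldl min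
              (PySem.Int.mod (t - idx) (n : Int)) < (n : Int) :=
            lt_of_le_of_lt (PySem.List.foldl_min_le _ _).1 (PySem.Int.mod_lt _ hnpos)
          have hL : aScan v (n : Int) (-1) idx v.length
              = (ts.map (fun j => PySem.Int.mod (idx - j) (n : Int))).foldl min
                  (PySem.Int.mod (idx - t) (n : Int)) := by
            have := scan_eq v n hv (-1) (Or.inr rfl) t ts hF v.length idx h0 h1
            rw [show -1 * (t - idx) = idx - t by ring, hLfun] at this
            exact this (by rw [hv]; exact_mod_cast hLbound)
          have hR : aScan v (n : Int) 1 idx v.length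
              = (ts.map (fun j => PySem.Int.mod (j - idx) (n : Int))).foldl min
                  (PySem.Int.mod (t - idx) (n : Int)) := by
            have := scan_eq v n hv 1 (Or.inl rfl) t ts hF v.length idx h0 h1
            rw [show (1 : Int) * (t - idx) = t - idx by ring, hRfun] at this
            exact this (by rw [hv]; exact_mod_cast hRbound)
          set Lm := (ts.map (fun j => PySem.Int.mod (idx - j) (n : Int))).foldl min
              (PySem.Int.mod (idx - t) (n : Int)) with hLm
          set Rm := (ts.map (fun j => PySem.Int.mod (j - idx) (n : Int))).foldl min
              (PySem.Int.mod (t - idx) (n : Int)) with hRm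
          -- the chosen target is a member of the todo list
          have hLmem : ∃ j ∈ t :: ts, Lm = PySem.Int.mod (idx - j) (n : Int) := by
            rcases PySem.List.foldl_min_mem (ts.map (fun j => PySem.Int.mod (idx - j) (n : Int)))
                (PySem.Int.mod (idx - t) (n : Int)) with h | h
            · exact ⟨t, List.mem_cons_self, h⟩
            · rcases List.mem_map.1 h with ⟨j, hj, hEq⟩
              exact ⟨j, List.mem_cons_of_mem _ hj, hEq.symm⟩
          have hRmem : ∃ j ∈ t :: ts, Rm = PySem.Int.mod (j - idx) (n : Int) := by
            rcases PySem.List.foldl_min_mem (ts.map (fun j => PySem.Int.mod (j - idx) (n : Int)))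
                (PySem.Int.mod (t - idx) (n : Int)) with h | h
            · exact ⟨t, List.mem_cons_self, h⟩
            · rcases List.mem_map.1 h with ⟨j, hj, hEq⟩
              exact ⟨j, List.mem_cons_of_mem _ hj, hEq.symm⟩
          by_cases hLR : Lm < Rm
          · -- left branch
            rcases hLmem with ⟨j, hjmem, hjEq⟩
            have hjb := falseIdx_bounds v j (by rw [hF]; exact hjmem)
            have hidx' : PySem.Int.mod (idx - Lm) (n : Int) = j := by
              rw [hjEq]; exact mod_roundL _ _ _ hnpos h0 h1 hjb.1 (by omega)
            have hset : falseIdx (aSet v (PySem.Int.mod (idx - Lm) (n : Int)) true) 0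
                = (t :: ts).erase (PySem.Int.mod (idx - Lm) (n : Int)) := by
              rw [hidx']
              unfold aSet
              rw [if_pos hjb.1]
              rw [falseIdx_set v 0 j.toNat (by omega) hjb.2.2]
              rw [hF, show (0 : Int) + (j.toNat : Int) = j by omega]
            have hlen' : (aSet v (PySem.Int.mod (idx - Lm) (n : Int)) true).length = n := by
              unfold aSet; split_ifs <;> simp [hv]
            have hrec := ih (aSet v (PySem.Int.mod (idx - Lm) (n : Int)) true)
                (PySem.Int.mod (idx - Lm) (n : Int))
                (cnt + aTurn (aGetC nl (PySem.Int.mod (idx - Lm) (n : Int))) + Lm)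
                hlen' (PySem.Int.mod_nonneg _ hnpos) (PySem.Int.mod_lt _ hnpos)
            rw [hset] at hrec
            -- unfold both loops one step
            show (if v.all (fun b => b) = true then cnt else _) = _
            rw [if_neg (by simp [hall])]
            simp only [hL, hR]
            rw [if_pos hLR]
            conv_rhs => rw [bLoop]
            simp only [← hLm, ← hRm]
            rw [if_pos hLR]
            rw [hrec]
            congr 1
            · have : aGetC nl (PySem.Int.mod (idx - Lm) (n : Int))
                  = bGetC nl (PySem.Int.mod (idx - Lm) (n : Int)) := rfl
              rw [← this]
              simp only [aTurn]
              rw [min_eq_left (le_of_lt hLR)]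
              split_ifs <;> omega
          · -- right branch
            rcases hRmem with ⟨j, hjmem, hjEq⟩
            have hjb := falseIdx_bounds v j (by rw [hF]; exact hjmem)
            have hidx' : PySem.Int.mod (idx + Rm) (n : Int) = j := by
              rw [hjEq]; exact mod_roundR _ _ _ hnpos h0 h1 hjb.1 (by omega)
            have hset : falseIdx (aSet v (PySem.Int.mod (idx + Rm) (n : Int)) true) 0
                = (t :: ts).erase (PySem.Int.mod (idx + Rm) (n : Int)) := by
              rw [hidx']
              unfold aSet
              rw [if_pos hjb.1]
              rw [falseIdx_set v 0 j.toNat (by omega) hjb.2.2]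
              rw [hF, show (0 : Int) + (j.toNat : Int) = j by omega]
            have hlen' : (aSet v (PySem.Int.mod (idx + Rm) (n : Int)) true).length = n := by
              unfold aSet; split_ifs <;> simp [hv]
            have hrec := ih (aSet v (PySem.Int.mod (idx + Rm) (n : Int)) true)
                (PySem.Int.mod (idx + Rm) (n : Int))
                (cnt + aTurn (aGetC nl (PySem.Int.mod (idx + Rm) (n : Int))) + Rm)
                hlen' (PySem.Int.mod_nonneg _ hnpos) (PySem.Int.mod_lt _ hnpos)
            rw [hset] at hrec
            show (if v.all (fun b => b) = true then cnt else _) = _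
            rw [if_neg (by simp [hall])]
            simp only [hL, hR]
            rw [if_neg hLR]
            conv_rhs => rw [bLoop]
            simp only [← hLm, ← hRm]
            rw [if_neg hLR]
            rw [hrec]
            congr 1
            · have : aGetC nl (PySem.Int.mod (idx + Rm) (n : Int))
                  = bGetC nl (PySem.Int.mod (idx + Rm) (n : Int)) := rfl
              rw [← this]
              simp only [aTurn]
              rw [min_eq_right (le_of_not_gt hLR)]
              split_ifs <;> omega

lemma init_aux (nl : List Char) :
    ∀ (rest : List Char) (off : Int),
    (∀ k : Nat, k < rest.length → bGetC nl (off + (k : Int)) = rest.getD k 'A') →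
    (PySem.List.pyRange off (off + (rest.length : Int))).filter (fun i => !(bGetC nl i == 'A'))
      = falseIdx (rest.map (fun c => c == 'A')) off := by
  intro rest
  induction rest with
  | nil =>
      intro off h
      have hemp : PySem.List.pyRange off (off + (([] : List Char).length : Int)) = [] := by
        refine List.eq_nil_iff_forall_not_mem.2 (fun x hx => ?_)
        rw [PySem.List.mem_pyRange_one] at hx
        simp at hx
        omega
      rw [hemp]
      simp [falseIdx]
  | cons ch rest ih =>
      intro off h
      have hlt : off < off + ((rest.length + 1 : Nat) : Int) := by push_cast; omega
      rw [show off + ((ch :: rest).length : Int) = off + ((rest.length + 1 : Nat) : Int) by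
            simp]
      rw [PySem.List.pyRange_one_cons hlt]
      have hhead : bGetC nl off = ch := by
        have := h 0 (by simp)
        simpa using this
      have hshift : ∀ k : Nat, k < rest.length → bGetC nl (off + 1 + (k : Int)) = rest.getD k 'A' := by
        intro k hk
        have := h (k + 1) (by simpa using hk)
        rw [show off + ((k + 1 : Nat) : Int) = off + 1 + (k : Int) by push_cast; ring] at this
        simpa using this
      have hrec := ih (off + 1) hshift
      rw [show off + ((rest.length + 1 : Nat) : Int) = off + 1 + (rest.length : Int) by
            push_cast; ring]
      by_cases hch : ch = 'A'
      · subst hch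
        simp only [List.filter_cons, hhead, List.map, falseIdx]
        simp [hrec]
      · have hne : (ch == 'A') = false := by simpa using hch
        simp only [List.filter_cons, hhead, hne, List.map, falseIdx]
        simp [hrec]

lemma solution_eq (name : String) (h : name ≠ "") :
    solution name = solution_alt name := by
  have hnl : name.toList ≠ [] := fun hh => h (String.toList_eq_nil_iff.1 hh)
  unfold solution solution_alt
  simp only []
  cases hcase : name.toList with
  | nil => exact absurd hcase hnl
  | cons c rest =>
      have hset : aSet ((c :: rest).map (fun c => c == 'A')) 0 true
          = true :: rest.map (fun c => c == 'A') := by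
        simp [aSet]
      rw [hset]
      have hloop := loop_eq (c :: rest) (c :: rest).length (c :: rest).length
          (true :: rest.map (fun c => c == 'A')) 0
          (((aGetC (c :: rest) 0).toNat : Int) - ('A'.toNat : Int))
          (by simp) (by omega) (by simp)
      rw [hloop]
      have hfi : falseIdx (true :: rest.map (fun c => c == 'A')) 0
          = falseIdx (rest.map (fun c => c == 'A')) 1 := by
        simp [falseIdx]
      rw [hfi]
      have htodo : (PySem.List.pyRange 1 ((c :: rest).length : Int)).filter
            (fun i => !(bGetC (c :: rest) i == 'A'))
          = falseIdx (rest.map (fun c => c == 'A')) 1 := by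
        have hh : ∀ k : Nat, k < rest.length →
            bGetC (c :: rest) (1 + (k : Int)) = rest.getD k 'A' := by
          intro k hk
          unfold bGetC
          rw [show (1 : Int) + (k : Int) = ((k + 1 : Nat) : Int) by push_cast; ring]
          rw [PySem.List.pyGetD_eq_getElem _ _ (by positivity) (by push_cast; simp; omega)]
          rw [List.getD_eq_getElem rest 'A' hk]
          simp
        have := init_aux (c :: rest) rest 1 hh
        rwa [show (1 : Int) + (rest.length : Int) = ((c :: rest).length : Int) by simp; ring]
          at this
      rw [htodo]
      rfl

-- ===== VERDICT (by name: the statement is the Claim_ definition above) =====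
theorem solution_spec : Claim_equal_solution := by
  intro name _ hpre
  unfold Spec_solution
  exact solution_eq name hpre
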